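-- pv_equiv track=rewrite | github.com/nicolapitzalis/upeftg | upeftguard/utilities/dataset_download.py | allocate_round_robin
-- ===== SOURCE A (Python) =====
-- from typing import Dict, List, Sequence, Tuple
--
-- def allocate_round_robin(total: int, capacities: Sequence[int]) -> List[int]:
--     if total < 0:
--         raise ValueError("total must be non-negative")
--     if total == 0:
--         return [0] * len(capacities)
--     if not capacities:
--         raise ValueError("no sources configured for allocation")
--     if sum(capacities) < total:
--         raise ValueError(
--             f"requested {total} models but only {sum(capacities)} are available"
--         )
--
--     allocation = [0] * len(capacities)
--     remaining = total
--     while remaining > 0: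
--         progressed = False
--         for i, capacity in enumerate(capacities):
--             if allocation[i] >= capacity:
--                 continue
--             allocation[i] += 1
--             remaining -= 1
--             progressed = True
--             if remaining == 0:
--                 break
--         if not progressed:
--             raise ValueError("allocation stalled before reaching requested total")
--     return allocation
-- ===== SOURCE B (Python) =====
-- from typing import List, Sequence
--
--
-- def allocate_round_robin(total: int, capacities: Sequence[int]) -> List[int]:
--     if total < 0:
--         raise ValueError("total must be non-negative")
--     if total == 0:
--         return [0] * len(capacities)
--     if not capacities:
--         raise ValueError("no sources configured for allocation")
--     if sum(capacities) < total:
--         raise ValueError(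
--             f"requested {total} models but only {sum(capacities)} are available"
--         )
--
--     # histogram of positive capacities: how many sources saturate at each level
--     hist = {}
--     for c in capacities:
--         if c > 0:
--             hist[c] = hist.get(c, 0) + 1
--     active = len([c for c in capacities if c > 0])
--
--     # bulk-execute full round-robin rounds: after k rounds each source holds
--     # min(max(c,0), k); 'active' sources are still unsaturated
--     k = 0
--     rem = total
--     while rem > active:
--         rem -= active
--         k += 1
--         active -= hist.get(k, 0)
--
--     # final partial round: the first 'rem' still-active sources (index order) get one more
--     out = []
--     for c in capacities:
--         base = min(max(c, 0), k)
--         if c > k and rem > 0: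
--             base += 1
--             rem -= 1
--         out.append(base)
--     return out
-- ===== Notes on version B (the rewrite author's own statement) =====
-- stated objective: alternative
-- what changed: Replaces A's unit-by-unit round-robin simulation with bulk rounds: a capacity histogram lets each full round be executed as one subtraction (rem -= active), then a single index-order pass distributes the final partial round.
import Mathlib
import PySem

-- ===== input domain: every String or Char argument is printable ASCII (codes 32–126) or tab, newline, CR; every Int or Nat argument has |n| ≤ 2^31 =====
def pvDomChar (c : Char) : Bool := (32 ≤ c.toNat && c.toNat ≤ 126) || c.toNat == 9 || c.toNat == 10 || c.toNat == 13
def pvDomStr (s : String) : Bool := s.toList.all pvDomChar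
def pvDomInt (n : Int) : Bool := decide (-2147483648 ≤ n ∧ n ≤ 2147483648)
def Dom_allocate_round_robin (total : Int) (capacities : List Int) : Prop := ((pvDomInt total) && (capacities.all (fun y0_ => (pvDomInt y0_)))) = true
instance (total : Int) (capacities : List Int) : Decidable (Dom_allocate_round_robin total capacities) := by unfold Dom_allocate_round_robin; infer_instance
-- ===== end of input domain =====

-- B replaces A's unit-by-unit round-robin simulation by bulk rounds over a capacity
-- histogram plus one final index-order pass; equivalence of RETURN VALUES is proved on
-- Pre_ (the inputs where A returns instead of raising ValueError).

-- ===== PORT A =====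
-- inner 'for i, capacity in enumerate(capacities)' walked as a zip of capacities with
-- the allocation list (indices are always in range); returns (allocation, remaining, progressed)
def pvAInner : List Int → List Int → Int → Bool → (List Int × Int × Bool)
  | c :: cs, a :: as_, remaining, progressed =>
    if c ≤ a then  -- allocation[i] >= capacity: continue
      let st := pvAInner cs as_ remaining progressed
      (a :: st.1, st.2)
    else if remaining - 1 = 0 then  -- break after serving
      ((a + 1) :: as_, 0, true)
    else
      let st := pvAInner cs as_ (remaining - 1) true
      ((a + 1) :: st.1, st.2)
  | _, as_, remaining, progressed => (as_, remaining, progressed)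

-- 'while remaining > 0'; fuel makes it total ([] stands for the unreachable stall raise
-- and for fuel exhaustion, which total+1 units of fuel rule out inside Pre_)
def pvALoop (caps : List Int) : Nat → List Int → Int → List Int
  | 0, _, _ => []
  | fuel + 1, alloc, remaining =>
    if 0 < remaining then
      let st := pvAInner caps alloc remaining false
      if st.2.2 then pvALoop caps fuel st.1 st.2.1
      else []  -- raise ValueError("allocation stalled...")
    else alloc

def allocate_round_robin (total : Int) (capacities : List Int) : List Int :=
  if total < 0 then []  -- raise ValueError
  else if total = 0 then List.replicate capacities.length 0
  else if capacities = [] then []  -- raise ValueError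
  else if capacities.sum < total then []  -- raise ValueError
  else pvALoop capacities (total.toNat + 1) (List.replicate capacities.length 0) total

-- ===== PORT B =====
-- 'while rem > active: rem -= active; k += 1; active -= hist.get(k, 0)'; on fuel
-- exhaustion the current (k, rem) is returned — inside Pre_ total units of fuel suffice
def pvBLevel (hist : PySem.Dict Int Int) : Nat → Int → Int → Int → Int × Int
  | 0, k, rem, _ => (k, rem)
  | fuel + 1, k, rem, active =>
    if active < rem then pvBLevel hist fuel (k + 1) (rem - active) (active - hist.getD (k + 1) 0)
    else (k, rem)

-- final pass: base = min(max(c,0),k); first rem still-active sources get one more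
def pvBOut : List Int → Int → Int → List Int
  | [], _, _ => []
  | c :: cs, k, r =>
    if k < c ∧ 0 < r then (min (max c 0) k + 1) :: pvBOut cs k (r - 1)
    else min (max c 0) k :: pvBOut cs k r

def allocate_round_robin_alt (total : Int) (capacities : List Int) : List Int :=
  if total < 0 then []  -- raise ValueError
  else if total = 0 then List.replicate capacities.length 0
  else if capacities = [] then []  -- raise ValueError
  else if capacities.sum < total then []  -- raise ValueError
  else
    let hist := capacities.foldl
      (fun d c => if 0 < c then d.insert c (d.getD c 0 + 1) else d) PySem.Dict.empty
    let active : Int := ((capacities.filter (fun c => decide (0 < c))).length : Int)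
    let kr := pvBLevel hist total.toNat 0 total active
    pvBOut capacities kr.1 kr.2

-- ===== PRECONDITION & SPEC =====
-- Pre_ = exactly the inputs where A returns (A raises ValueError on total < 0, on
-- positive total with no sources, and on total exceeding sum(capacities))
def Pre_allocate_round_robin (total : Int) (capacities : List Int) : Prop :=
  0 ≤ total ∧ (total = 0 ∨ (capacities ≠ [] ∧ total ≤ capacities.sum))
instance (total : Int) (capacities : List Int) : Decidable (Pre_allocate_round_robin total capacities) := by unfold Pre_allocate_round_robin; infer_instance

def pvWitness_allocate_round_robin : Int × List Int := (5, [2, 3, 1])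

def Spec_allocate_round_robin (total : Int) (capacities : List Int) (out : List Int) : Prop := out = allocate_round_robin_alt total capacities
instance (total : Int) (capacities : List Int) (out : List Int) : Decidable (Spec_allocate_round_robin total capacities out) := by unfold Spec_allocate_round_robin; infer_instance

-- ===== CLAIM (what is proved, stated in full; the proofs are below) =====
def Claim_equal_allocate_round_robin : Prop := ∀ (total : Int) (capacities : List Int), Dom_allocate_round_robin total capacities → Pre_allocate_round_robin total capacities → Spec_allocate_round_robin total capacities (allocate_round_robin total capacities)

-- ===== LEMMAS AND PROOFS =====

-- 'sources still below cap at level j' and 'units distributed through level j'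
def pvCnt (caps : List Int) (j : Int) : Int :=
  ((caps.filter (fun c => decide (j < c))).length : Int)
def pvFSum (caps : List Int) (j : Int) : Int :=
  (caps.map (fun c => min (max c 0) j)).sum
def pvS (caps : List Int) : Int := (caps.map (fun c => max c 0)).sum

theorem pvCnt_nonneg (caps : List Int) (j : Int) : 0 ≤ pvCnt caps j := by
  simp [pvCnt]

theorem pvCnt_succ (caps : List Int) (j : Int) :
    pvCnt caps (j + 1) = pvCnt caps j - (caps.count (j + 1) : Int) := by
  induction caps with
  | nil => simp [pvCnt]
  | cons c cs ih =>
    simp only [pvCnt, List.filter_cons, List.count_cons] at *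
    by_cases h1 : j + 1 < c <;> by_cases h2 : j < c <;> by_cases h3 : c = j + 1 <;>
      simp [h1, h2, h3] <;> omega

theorem pvFSum_succ (caps : List Int) (j : Int) (hj : 0 ≤ j) :
    pvFSum caps (j + 1) = pvFSum caps j + pvCnt caps j := by
  induction caps with
  | nil => simp [pvFSum, pvCnt]
  | cons c cs ih =>
    simp only [pvFSum, pvCnt, List.map_cons, List.sum_cons, List.filter_cons] at *
    by_cases h : j < c <;> simp [h] <;> omega

theorem pvFSum_zero (caps : List Int) : pvFSum caps 0 = 0 := by
  induction caps with
  | nil => simp [pvFSum]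
  | cons c cs ih => simp only [pvFSum, List.map_cons, List.sum_cons] at *; omega

theorem pvSum_le_pvS (caps : List Int) : caps.sum ≤ pvS caps := by
  induction caps with
  | nil => simp [pvS]
  | cons c cs ih => simp only [pvS, List.map_cons, List.sum_cons, List.sum_cons] at *; omega

theorem pvCnt_pos (caps : List Int) (j : Int) (hj : 0 ≤ j)
    (h : pvFSum caps j < pvS caps) : 0 < pvCnt caps j := by
  induction caps with
  | nil => simp [pvFSum, pvS] at h
  | cons c cs ih =>
    by_cases hc : j < c
    · have h1 : pvCnt (c :: cs) j = pvCnt cs j + 1 := by simp [pvCnt, hc]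
      have := pvCnt_nonneg cs j; omega
    · have h1 : pvCnt (c :: cs) j = pvCnt cs j := by simp [pvCnt, hc]
      have h2 : pvFSum (c :: cs) j = min (max c 0) j + pvFSum cs j := by simp [pvFSum]
      have h3 : pvS (c :: cs) = max c 0 + pvS cs := by simp [pvS]
      rw [h1]; exact ih (by omega)

theorem pvBOut_cons_pos (c : Int) (cs : List Int) (k r : Int) (h1 : k < c) (h2 : 0 < r) :
    pvBOut (c :: cs) k r = (min (max c 0) k + 1) :: pvBOut cs k (r - 1) := by
  simp only [pvBOut]; rw [if_pos ⟨h1, h2⟩]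

theorem pvBOut_cons_neg (c : Int) (cs : List Int) (k r : Int) (h : ¬(k < c ∧ 0 < r)) :
    pvBOut (c :: cs) k r = min (max c 0) k :: pvBOut cs k r := by
  simp only [pvBOut]; rw [if_neg h]

theorem pvBOut_zero (cs : List Int) (k r : Int) (hr : r ≤ 0) :
    pvBOut cs k r = cs.map (fun c => min (max c 0) k) := by
  induction cs with
  | nil => simp [pvBOut]
  | cons c cs ih => rw [pvBOut_cons_neg c cs k r (by omega), ih]; simp

-- one pass of A's inner for-loop, from a round boundary: either it breaks mid-round
-- (serving the first rem still-active sources — exactly pvBOut) or completes a full round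
theorem pvRound (j : Int) (hj : 0 ≤ j) :
    ∀ (caps : List Int) (rem : Int) (p : Bool), 1 ≤ rem →
    pvAInner caps (caps.map (fun c => min (max c 0) j)) rem p =
      if rem ≤ pvCnt caps j then (pvBOut caps j rem, 0, true)
      else (caps.map (fun c => min (max c 0) (j + 1)), rem - pvCnt caps j,
            p || decide (0 < pvCnt caps j)) := by
  intro caps
  induction caps with
  | nil =>
    intro rem p hrem
    rw [if_neg (by simp [pvCnt]; omega)]
    simp [pvAInner, pvCnt]
  | cons c cs ih =>
    intro rem p hrem
    simp only [List.map_cons, pvAInner]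
    by_cases hc : j < c
    · -- active source: served
      have ha : min (max c 0) j = j := by omega
      have hcnt : pvCnt (c :: cs) j = pvCnt cs j + 1 := by simp [pvCnt, hc]
      rw [if_neg (by omega)]
      by_cases h1 : rem - 1 = 0
      · -- break: rem = 1
        rw [if_pos h1, if_pos (by have := pvCnt_nonneg cs j; omega),
          pvBOut_cons_pos c cs j rem hc (by omega),
          pvBOut_zero cs j (rem - 1) (by omega), ha]
      · rw [if_neg h1, ih (rem - 1) true (by omega)]
        by_cases h2 : rem - 1 ≤ pvCnt cs j
        · rw [if_pos h2, if_pos (by omega), pvBOut_cons_pos c cs j rem hc (by omega), ha]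
        · rw [if_neg h2, if_neg (by omega)]
          have hb : min (max c 0) (j + 1) = j + 1 := by omega
          simp [ha, hb, hcnt]
          exact ⟨by omega, Or.inr (pvCnt_nonneg cs j)⟩
    · -- saturated (or nonpositive) source: skipped
      have ha : c ≤ min (max c 0) j := by omega
      have hcnt : pvCnt (c :: cs) j = pvCnt cs j := by simp [pvCnt, hc]
      have hb : min (max c 0) (j + 1) = min (max c 0) j := by omega
      rw [if_pos ha, ih rem p hrem]
      by_cases h2 : rem ≤ pvCnt cs j
      · rw [if_pos h2, if_pos (by omega), pvBOut_cons_neg c cs j rem (by omega)]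
      · rw [if_neg h2, if_neg (by omega)]
        simp [hb, hcnt]

-- A's outer while-loop runs in step with B's bulk-round loop
theorem pvParallel (caps : List Int) (hist : PySem.Dict Int Int)
    (Hhist : ∀ x : Int, 0 < x → hist.getD x 0 = (caps.count x : Int)) :
    ∀ (fuelA fuelB : Nat) (j rem : Int), 0 ≤ j → 1 ≤ rem →
    rem ≤ pvS caps - pvFSum caps j → rem.toNat < fuelA → rem.toNat ≤ fuelB →
    pvALoop caps fuelA (caps.map (fun c => min (max c 0) j)) rem =
      pvBOut caps (pvBLevel hist fuelB j rem (pvCnt caps j)).1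
                  (pvBLevel hist fuelB j rem (pvCnt caps j)).2 := by
  intro fuelA
  induction fuelA with
  | zero => intro fuelB j rem _ _ _ hfa _; omega
  | succ fa ihA =>
    intro fuelB j rem hj hrem hS hfa hfb
    obtain ⟨fb, rfl⟩ : ∃ fb, fuelB = fb + 1 := ⟨fuelB - 1, by omega⟩
    simp only [pvALoop, if_pos (by omega : (0:Int) < rem)]
    rw [pvRound j hj caps rem false hrem]
    by_cases hcase : rem ≤ pvCnt caps j
    · -- partial (or exactly-completing) round: A breaks, B's loop stops
      rw [if_pos hcase]
      simp only
      obtain ⟨fa', rfl⟩ : ∃ fa', fa = fa' + 1 := ⟨fa - 1, by omega⟩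
      simp only [pvALoop, if_neg (by omega : ¬ (0:Int) < 0)]
      simp only [pvBLevel, if_neg (by omega : ¬ pvCnt caps j < rem), if_true]
    · -- full round: both advance one level
      rw [if_neg hcase]
      have hpos : 0 < pvCnt caps j := by
        apply pvCnt_pos caps j hj; omega
      simp only [Bool.false_or, decide_eq_true hpos]
      have hstep : pvCnt caps j - hist.getD (j + 1) 0 = pvCnt caps (j + 1) := by
        rw [Hhist (j + 1) (by omega), pvCnt_succ]
      simp only [pvBLevel, if_pos (by omega : pvCnt caps j < rem), hstep, if_true]
      rw [ihA fb (j + 1) (rem - pvCnt caps j) (by omega) (by omega)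
        (by rw [pvFSum_succ caps j hj]; omega) (by omega) (by omega)]

theorem pvFoldIf (caps : List Int) :
    ∀ d : PySem.Dict Int Int,
    caps.foldl (fun d c => if 0 < c then d.insert c (d.getD c 0 + 1) else d) d =
      (caps.filter (fun c => decide (0 < c))).foldl
        (fun d c => d.insert c (d.getD c 0 + 1)) d := by
  induction caps with
  | nil => intro d; simp
  | cons c cs ih =>
    intro d
    simp only [List.foldl_cons, List.filter_cons]
    by_cases hc : 0 < c <;> simp [hc, ih]

theorem pvHist_getD (caps : List Int) (x : Int) (hx : 0 < x) :
    (caps.foldl (fun d c => if 0 < c then d.insert c (d.getD c 0 + 1) else d)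
      PySem.Dict.empty).getD x 0 = (caps.count x : Int) := by
  rw [pvFoldIf, PySem.Dict.getD_foldl_insert_add_one, PySem.Dict.getD_empty]
  rw [List.count_filter (by simp [hx])]
  simp

theorem pvReplicate_map (caps : List Int) :
    List.replicate caps.length 0 = caps.map (fun c => min (max c 0) 0) := by
  induction caps with
  | nil => simp
  | cons c cs ih =>
    rw [List.length_cons, List.replicate_succ, List.map_cons, ih]
    have : min (max c 0) 0 = 0 := by omega
    rw [this]

-- ===== VERDICT (by name: the statement is the Claim_ definition above) =====
theorem allocate_round_robin_spec : Claim_equal_allocate_round_robin := by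
  intro total caps _ hpre
  unfold Spec_allocate_round_robin allocate_round_robin allocate_round_robin_alt
  obtain ⟨h0, hrest⟩ := hpre
  rw [if_neg (by omega : ¬ total < 0), if_neg (by omega : ¬ total < 0)]
  by_cases ht : total = 0
  · rw [if_pos ht, if_pos ht]
  · rw [if_neg ht, if_neg ht]
    obtain ⟨hne, hsum⟩ := hrest.resolve_left ht
    rw [if_neg hne, if_neg hne, if_neg (by omega), if_neg (by omega)]
    simp only
    rw [pvReplicate_map caps]
    have hcnt0 : ((caps.filter (fun c => decide (0 < c))).length : Int) = pvCnt caps 0 := rfl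
    rw [hcnt0]
    apply pvParallel caps _ (fun x hx => pvHist_getD caps x hx) (total.toNat + 1) total.toNat
      0 total le_rfl (by omega)
    · rw [pvFSum_zero]; have := pvSum_le_pvS caps; omega
    · omega
    · omega
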